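-- pv_equiv track=rewrite | github.com/AndreasThinks/three-column-format-model | scripts/generate_training_data.py | pick_reference_seeds
-- ===== SOURCE A (Python) =====
-- def pick_reference_seeds(seeds: list[dict], target_domain: str, n: int = 2) -> list[dict]:
--     """Pick reference seeds: prefer same domain, then fill from others.
--
--     Guards against infinite loop if seed set is smaller than n.
--     """
--     same = [s for s in seeds if s["domain"] == target_domain]
--     other = [s for s in seeds if s["domain"] != target_domain]
--
--     refs = same[:1] + other[:1]
--     # Pad if needed, but cap at total available seeds
--     max_possible = min(n, len(seeds))
--     while len(refs) < max_possible:
--         added = False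
--         for s in seeds:
--             if s not in refs:
--                 refs.append(s)
--                 added = True
--                 if len(refs) >= max_possible:
--                     break
--         if not added:
--             break
--     return refs[:max_possible]
-- ===== SOURCE B (Python) =====
-- def pick_reference_seeds(seeds: list[dict], target_domain: str, n: int = 2) -> list[dict]:
--     """Pick reference seeds via a precomputed canonical ordering.
--
--     Stage 1: collect the distinct seeds (value equality) in first-occurrence order.
--     Stage 2: promote the first same-domain and the first other-domain seed to the front.
--     Stage 3: return the first min(n, len(seeds)) of that ordering (none if the cap is <= 0).
--     """
--     unique = []
--     for s in seeds:
--         if s not in unique: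
--             unique.append(s)
--     first_same = next((s for s in unique if s["domain"] == target_domain), None)
--     first_other = next((s for s in unique if s["domain"] != target_domain), None)
--     front = [s for s in (first_same, first_other) if s is not None]
--     ordering = front + [s for s in unique if s not in front]
--     cap = min(n, len(seeds))
--     return ordering[:cap] if cap > 0 else []
-- ===== Notes on version B (the rewrite author's own statement) =====
-- stated objective: alternative
-- what changed: Instead of A's interleave-then-greedy-fill with a cap checked during the retry loop, B first builds the full canonical ordering (dedup all seeds in first-occurrence order, then promote the first same-domain and first other-domain seed to the front) and only then truncates it to min(n, len(seeds)), returning [] when that cap is not positive.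
-- intended difference: For n = -1 when seeds contains both a same-domain and an other-domain seed, A returns refs[:-1] = [first same-domain seed] (an accident of Python negative slicing applied to the count), while B returns [], the intended result of asking for a negative number of reference seeds. — e.g. on pick_reference_seeds([[("domain", "a")], [("domain", "b")]], "a", -1): A returns [[("domain", "a")]], B returns []
import Mathlib
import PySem

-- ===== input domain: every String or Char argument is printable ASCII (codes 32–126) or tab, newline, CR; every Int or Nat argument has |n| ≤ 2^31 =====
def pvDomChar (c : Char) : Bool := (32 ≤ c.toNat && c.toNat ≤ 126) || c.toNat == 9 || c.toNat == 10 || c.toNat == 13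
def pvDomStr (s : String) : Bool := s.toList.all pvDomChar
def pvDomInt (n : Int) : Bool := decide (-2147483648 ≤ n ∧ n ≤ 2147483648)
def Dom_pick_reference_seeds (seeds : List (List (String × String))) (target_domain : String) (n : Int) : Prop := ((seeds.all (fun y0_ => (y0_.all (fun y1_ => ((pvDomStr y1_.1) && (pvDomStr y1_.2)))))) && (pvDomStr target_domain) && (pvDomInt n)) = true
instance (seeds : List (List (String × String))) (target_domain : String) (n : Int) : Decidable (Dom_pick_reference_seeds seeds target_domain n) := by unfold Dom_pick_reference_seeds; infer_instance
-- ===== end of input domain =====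

-- B builds the full deduplicated canonical ordering first (same-domain, other-domain, rest) and
-- truncates only at the end, instead of A's while/added retry fill with an in-loop cap (objective: alternative).

-- ===== PORT A =====
-- Python 'dict == dict' on assoc-list dicts: key set and values, insertion order ignored (used by both ports for 's not in …')
def pyDictEq (a b : List (String × String)) : Bool :=
  (a.all (fun p => (PySem.Dict.mk b).get? p.1 == some p.2)) &&
  (b.all (fun p => (PySem.Dict.mk a).get? p.1 == some p.2))

-- Python 's in refs' (list membership by dict value-equality)
def pySeedIn (s : List (String × String)) (refs : List (List (String × String))) : Bool :=
  refs.any (fun r => pyDictEq r s)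

-- the 'for s in seeds' pass of A's while body (returns the new refs and the 'added' flag; breaks when len(refs) >= max)
def pvAFor (mx : Int) (refs : List (List (String × String))) (added : Bool) :
    List (List (String × String)) → List (List (String × String)) × Bool
  | [] => (refs, added)
  | s :: rest =>
    if pySeedIn s refs then pvAFor mx refs added rest
    else if (((refs ++ [s]).length : Int) ≥ mx) then (refs ++ [s], true)
    else pvAFor mx (refs ++ [s]) true rest

-- A's 'while len(refs) < max_possible' loop; the fuel only makes it total and is never exhausted on Pre_ inputs
def pvAWhile (mx : Int) (seeds : List (List (String × String))) :
    Nat → List (List (String × String)) → List (List (String × String))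
  | 0, refs => refs
  | fuel + 1, refs =>
    if ((refs.length : Int) < mx) then
      let r := pvAFor mx refs false seeds
      if r.2 then pvAWhile mx seeds fuel r.1 else r.1
    else refs

def pick_reference_seeds (seeds : List (List (String × String))) (target_domain : String) (n : Int) : List (List (String × String)) :=
  let same := seeds.filter (fun s => (PySem.Dict.mk s).getD "domain" "" == target_domain)
  let other := seeds.filter (fun s => !((PySem.Dict.mk s).getD "domain" "" == target_domain))
  let refs := PySem.List.slice same none (some 1) ++ PySem.List.slice other none (some 1)
  let max_possible := min n (PySem.List.len seeds)
  PySem.List.slice (pvAWhile max_possible seeds (seeds.length + 2) refs) none (some max_possible)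

-- ===== PORT B =====
-- stage 1 of B: 'for s in seeds: if s not in unique: unique.append(s)'
def pvDedup (acc : List (List (String × String))) :
    List (List (String × String)) → List (List (String × String))
  | [] => acc
  | s :: rest => if pySeedIn s acc then pvDedup acc rest else pvDedup (acc ++ [s]) rest

def pick_reference_seeds_alt (seeds : List (List (String × String))) (target_domain : String) (n : Int) : List (List (String × String)) :=
  let unique := pvDedup [] seeds
  let first_same := unique.find? (fun s => (PySem.Dict.mk s).getD "domain" "" == target_domain)
  let first_other := unique.find? (fun s => !((PySem.Dict.mk s).getD "domain" "" == target_domain))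
  let front := first_same.toList ++ first_other.toList
  let ordering := front ++ unique.filter (fun s => !pySeedIn s front)
  let cap := min n (PySem.List.len seeds)
  if 0 < cap then PySem.List.slice ordering none (some cap) else []

-- ===== PRECONDITION & SPEC =====
-- Pre_ excludes seeds without the key "domain" (there A raises KeyError) and assoc lists with duplicate
-- keys (a Python dict cannot have duplicate keys, so such lists represent no Python input at all).
def Pre_pick_reference_seeds (seeds : List (List (String × String))) (target_domain : String) (n : Int) : Prop :=
  ∀ s ∈ seeds, (s.map Prod.fst).Nodup ∧ ((PySem.Dict.mk s).get? "domain").isSome = true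
instance (seeds : List (List (String × String))) (target_domain : String) (n : Int) : Decidable (Pre_pick_reference_seeds seeds target_domain n) := by unfold Pre_pick_reference_seeds; infer_instance

def pvWitness_pick_reference_seeds : (List (List (String × String))) × String × Int :=
  ([[("domain", "a")], [("domain", "b")]], "a", 2)

-- For n = -1 with both a same-domain and an other-domain seed present, A returns refs[:-1] = [first
-- same-domain seed] (an accident of Python negative slicing applied to the count), while B returns [],
-- the intended result of asking for a negative number of reference seeds.
def D_pick_reference_seeds (seeds : List (List (String × String))) (target_domain : String) (n : Int) : Prop :=
  n = -1 ∧ (∃ s ∈ seeds, (PySem.Dict.mk s).getD "domain" "" = target_domain)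
         ∧ (∃ s ∈ seeds, (PySem.Dict.mk s).getD "domain" "" ≠ target_domain)
instance (seeds : List (List (String × String))) (target_domain : String) (n : Int) : Decidable (D_pick_reference_seeds seeds target_domain n) := by unfold D_pick_reference_seeds; infer_instance

def Spec_pick_reference_seeds (seeds : List (List (String × String))) (target_domain : String) (n : Int) (out : List (List (String × String))) : Prop :=
  ¬ D_pick_reference_seeds seeds target_domain n → out = pick_reference_seeds_alt seeds target_domain n
instance (seeds : List (List (String × String))) (target_domain : String) (n : Int) (out : List (List (String × String))) : Decidable (Spec_pick_reference_seeds seeds target_domain n out) := by unfold Spec_pick_reference_seeds; infer_instance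

def pvDiffWitness_pick_reference_seeds : (List (List (String × String))) × String × Int :=
  ([[("domain", "a")], [("domain", "b")]], "a", -1)

def pvDiffWitnessOut_pick_reference_seeds : (List (List (String × String))) × (List (List (String × String))) :=
  ([[("domain", "a")]], [])

-- ===== CLAIM (what is proved, stated in full; the proofs are below) =====
def Claim_unchanged_pick_reference_seeds : Prop := ∀ (seeds : List (List (String × String))) (target_domain : String) (n : Int), Dom_pick_reference_seeds seeds target_domain n → Pre_pick_reference_seeds seeds target_domain n → Spec_pick_reference_seeds seeds target_domain n (pick_reference_seeds seeds target_domain n)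
def Claim_changed_pick_reference_seeds : Prop := Dom_pick_reference_seeds (pvDiffWitness_pick_reference_seeds.1) (pvDiffWitness_pick_reference_seeds.2.1) (pvDiffWitness_pick_reference_seeds.2.2) ∧ Pre_pick_reference_seeds (pvDiffWitness_pick_reference_seeds.1) (pvDiffWitness_pick_reference_seeds.2.1) (pvDiffWitness_pick_reference_seeds.2.2) ∧ D_pick_reference_seeds (pvDiffWitness_pick_reference_seeds.1) (pvDiffWitness_pick_reference_seeds.2.1) (pvDiffWitness_pick_reference_seeds.2.2) ∧ pick_reference_seeds (pvDiffWitness_pick_reference_seeds.1) (pvDiffWitness_pick_reference_seeds.2.1) (pvDiffWitness_pick_reference_seeds.2.2) = pvDiffWitnessOut_pick_reference_seeds.1 ∧ pick_reference_seeds_alt (pvDiffWitness_pick_reference_seeds.1) (pvDiffWitness_pick_reference_seeds.2.1) (pvDiffWitness_pick_reference_seeds.2.2) = pvDiffWitnessOut_pick_reference_seeds.2 ∧ pvDiffWitnessOut_pick_reference_seeds.1 ≠ pvDiffWitnessOut_pick_reference_seeds.2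
def Claim_exact_pick_reference_seeds : Prop := ∀ (seeds : List (List (String × String))) (target_domain : String) (n : Int), Dom_pick_reference_seeds seeds target_domain n → Pre_pick_reference_seeds seeds target_domain n → D_pick_reference_seeds seeds target_domain n → pick_reference_seeds seeds target_domain n ≠ pick_reference_seeds_alt seeds target_domain n

-- ===== LEMMAS AND PROOFS =====

-- xs[:b] for 0 ≤ b
theorem pvSliceTo_nonneg {α : Type} (xs : List α) (b : Int) (h : 0 ≤ b) :
    PySem.List.slice xs none (some b) = xs.take b.toNat := by
  have := PySem.List.slice_to_natCast xs b.toNat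
  rwa [Int.toNat_of_nonneg h] at this

-- xs[:b] for b < 0
theorem pvSliceTo_neg {α : Type} (xs : List α) (b : Int) (h : b < 0) :
    PySem.List.slice xs none (some b) = xs.take ((xs.length : Int) + b).toNat := by
  have hk : 0 < (-b).toNat := by omega
  have hb : -((-b).toNat : Int) = b := by omega
  have := PySem.List.slice_to_neg_natCast xs (-b).toNat hk
  rw [hb] at this
  rw [this]
  congr 1
  omega

theorem pyDictEq_refl (s : List (String × String)) (h : (s.map Prod.fst).Nodup) :
    pyDictEq s s = true := by
  unfold pyDictEq
  have : s.all (fun p => (PySem.Dict.mk s).get? p.1 == some p.2) = true := by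
    rw [List.all_eq_true]
    intro p hp
    have hkeys : (PySem.Dict.mk s).keys.Nodup := by
      simpa [PySem.Dict.keys_mk] using h
    have : (PySem.Dict.mk s).get? p.1 = some p.2 :=
      PySem.Dict.get?_of_mem_items (PySem.Dict.mk s) (by exact hp) hkeys
    simp [this]
  simp [this]

-- equal-as-python-dicts assoc lists have the same lookup function (no nodup needed for this direction)
theorem pyDictEq_get? (a b : List (String × String)) (h : pyDictEq a b = true) (k : String) :
    (PySem.Dict.mk a).get? k = (PySem.Dict.mk b).get? k := by
  unfold pyDictEq at h
  rw [Bool.and_eq_true, List.all_eq_true, List.all_eq_true] at h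
  cases hga : (PySem.Dict.mk a).get? k with
  | some v =>
    have hmem : (k, v) ∈ a := PySem.Dict.mem_items_of_get?_eq_some _ hga
    have := h.1 (k, v) hmem
    simp only [beq_iff_eq] at this
    rw [this]
  | none =>
    cases hgb : (PySem.Dict.mk b).get? k with
    | none => rfl
    | some w =>
      have hmem : (k, w) ∈ b := PySem.Dict.mem_items_of_get?_eq_some _ hgb
      have := h.2 (k, w) hmem
      simp only [beq_iff_eq] at this
      rw [hga] at this
      cases this

-- converse: equal lookup functions give pyDictEq (needs nodup keys)
theorem pyDictEq_of_get? (a b : List (String × String))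
    (ha : (a.map Prod.fst).Nodup) (hb : (b.map Prod.fst).Nodup)
    (h : ∀ k, (PySem.Dict.mk a).get? k = (PySem.Dict.mk b).get? k) : pyDictEq a b = true := by
  have hka : (PySem.Dict.mk a).keys.Nodup := by simpa [PySem.Dict.keys_mk] using ha
  have hkb : (PySem.Dict.mk b).keys.Nodup := by simpa [PySem.Dict.keys_mk] using hb
  unfold pyDictEq
  rw [Bool.and_eq_true, List.all_eq_true, List.all_eq_true]
  constructor
  · intro p hp
    have : (PySem.Dict.mk a).get? p.1 = some p.2 :=
      PySem.Dict.get?_of_mem_items (PySem.Dict.mk a) (by exact hp) hka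
    rw [h p.1] at this
    simp [this]
  · intro p hp
    have : (PySem.Dict.mk b).get? p.1 = some p.2 :=
      PySem.Dict.get?_of_mem_items (PySem.Dict.mk b) (by exact hp) hkb
    rw [← h p.1] at this
    simp [this]

theorem pyDictEq_trans (a b c : List (String × String))
    (ha : (a.map Prod.fst).Nodup) (hc : (c.map Prod.fst).Nodup)
    (h1 : pyDictEq a b = true) (h2 : pyDictEq b c = true) : pyDictEq a c = true :=
  pyDictEq_of_get? a c ha hc (fun k => (pyDictEq_get? a b h1 k).trans (pyDictEq_get? b c h2 k))

-- pyDictEq-equal dicts agree on getD, hence on any domain predicate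
theorem pyDictEq_getD (a b : List (String × String)) (h : pyDictEq a b = true) (k d : String) :
    (PySem.Dict.mk a).getD k d = (PySem.Dict.mk b).getD k d := by
  rw [PySem.Dict.getD_eq_get?_getD, PySem.Dict.getD_eq_get?_getD, pyDictEq_get? a b h k]

theorem pySeedIn_append (x s : List (String × String)) (refs : List (List (String × String))) :
    pySeedIn x (refs ++ [s]) = (pySeedIn x refs || pyDictEq s x) := by
  simp [pySeedIn]

theorem pySeedIn_concat (x : List (String × String)) (A B : List (List (String × String))) :
    pySeedIn x (A ++ B) = (pySeedIn x A || pySeedIn x B) := by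
  simp [pySeedIn]

-- appending a redundant element does not change membership tests (on nodup-key dicts)
theorem pySeedIn_redundant (A : List (List (String × String))) (s x : List (String × String))
    (hA : ∀ r ∈ A, (r.map Prod.fst).Nodup) (hx : (x.map Prod.fst).Nodup)
    (hsA : pySeedIn s A = true) : pySeedIn x (A ++ [s]) = pySeedIn x A := by
  rw [pySeedIn_append]
  cases hq : pyDictEq s x with
  | false => simp
  | true =>
    obtain ⟨r, hr, hrs⟩ : ∃ r ∈ A, pyDictEq r s = true := by
      simpa [pySeedIn] using hsA
    have : pyDictEq r x = true := pyDictEq_trans r s x (hA r hr) hx hrs hq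
    have : pySeedIn x A = true := by
      unfold pySeedIn
      rw [List.any_eq_true]
      exact ⟨r, hr, this⟩
    simp [this]

-- membership in refs is preserved by the for-pass
theorem pvAFor_mono (mx : Int) (x : List (String × String)) :
    ∀ (rest : List (List (String × String))) (refs : List (List (String × String))) (added : Bool),
      pySeedIn x refs = true → pySeedIn x (pvAFor mx refs added rest).1 = true := by
  intro rest
  induction rest with
  | nil => intro refs added h; simpa [pvAFor] using h
  | cons s rest ih =>
    intro refs added h
    by_cases hs : pySeedIn s refs = true
    · simpa [pvAFor, hs] using ih refs added h
    · have hx : pySeedIn x (refs ++ [s]) = true := by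
        rw [pySeedIn_append, h]; simp
      by_cases hc : mx ≤ (refs.length : Int) + 1
      · simpa [pvAFor, hs, hc] using hx
      · simpa [pvAFor, hs, hc] using ih (refs ++ [s]) true hx

-- the for-pass either reaches the cap or ends with every seed present (needs nodup keys for self-equality)
theorem pvAFor_complete (mx : Int) :
    ∀ (rest : List (List (String × String))) (refs : List (List (String × String))) (added : Bool),
      (∀ s ∈ rest, (s.map Prod.fst).Nodup) →
      (mx ≤ ((pvAFor mx refs added rest).1.length : Int)) ∨
        (∀ s ∈ rest, pySeedIn s (pvAFor mx refs added rest).1 = true) := by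
  intro rest
  induction rest with
  | nil => intro refs added _; right; intro s hs; cases hs
  | cons s rest ih =>
    intro refs added hnd
    have hnds : (s.map Prod.fst).Nodup := hnd s (by simp)
    have hndr : ∀ t ∈ rest, (t.map Prod.fst).Nodup := fun t ht => hnd t (by simp [ht])
    by_cases hs : pySeedIn s refs = true
    · rcases ih refs added hndr with h | h
      · left; simpa [pvAFor, hs] using h
      · right; intro t ht
        rcases List.mem_cons.mp ht with rfl | ht'
        · simpa [pvAFor, hs] using pvAFor_mono mx t rest refs added hs
        · simpa [pvAFor, hs] using h t ht'
    · have hself : pySeedIn s (refs ++ [s]) = true := by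
        rw [pySeedIn_append, pyDictEq_refl s hnds]; simp
      by_cases hc : mx ≤ (refs.length : Int) + 1
      · left; simp [pvAFor, hs, hc]
      · rcases ih (refs ++ [s]) true hndr with h | h
        · left; simpa [pvAFor, hs, hc] using h
        · right; intro t ht
          rcases List.mem_cons.mp ht with ht0 | ht'
          · subst ht0; simpa [pvAFor, hs, hc] using pvAFor_mono mx t rest (refs ++ [t]) true hself
          · simpa [pvAFor, hs, hc] using h t ht'

theorem pvAFor_nochange (mx : Int) :
    ∀ (rest : List (List (String × String))) (refs : List (List (String × String))) (added : Bool),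
      (∀ s ∈ rest, pySeedIn s refs = true) → pvAFor mx refs added rest = (refs, added) := by
  intro rest
  induction rest with
  | nil => intro refs added _; rfl
  | cons s rest ih =>
    intro refs added h
    have hs : pySeedIn s refs = true := h s (by simp)
    simpa [pvAFor, hs] using ih refs added (fun t ht => h t (by simp [ht]))

-- proof device: the capped greedy fill A's loop amounts to (not part of either port's definition)
def pvBLoop (mx : Int) (refs : List (List (String × String))) :
    List (List (String × String)) → List (List (String × String))
  | [] => refs
  | s :: rest =>
    if ((refs.length : Int) ≥ mx) then refs
    else if pySeedIn s refs then pvBLoop mx refs rest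
    else pvBLoop mx (refs ++ [s]) rest

theorem pvBLoop_stop (mx : Int) (refs : List (List (String × String)))
    (cand : List (List (String × String))) (h : mx ≤ (refs.length : Int)) :
    pvBLoop mx refs cand = refs := by
  cases cand with
  | nil => rfl
  | cons s rest => simp [pvBLoop, h]

theorem pvAFor_fst (mx : Int) :
    ∀ (rest : List (List (String × String))) (refs : List (List (String × String))) (added : Bool),
      (refs.length : Int) < mx → (pvAFor mx refs added rest).1 = pvBLoop mx refs rest := by
  intro rest
  induction rest with
  | nil => intro refs added _; rfl
  | cons s rest ih =>
    intro refs added h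
    have hng : ¬ ((refs.length : Int) ≥ mx) := by omega
    by_cases hs : pySeedIn s refs = true
    · simpa [pvAFor, pvBLoop, hs, hng] using ih refs added h
    · by_cases hc : mx ≤ (refs.length : Int) + 1
      · have : pvBLoop mx (refs ++ [s]) rest = refs ++ [s] := pvBLoop_stop mx _ rest (by simp; omega)
        simp [pvAFor, pvBLoop, hs, hng, hc, this]
      · have hlt : ((refs ++ [s]).length : Int) < mx := by simp; omega
        simpa [pvAFor, pvBLoop, hs, hng, hc] using ih (refs ++ [s]) true hlt

-- A's while loop computes exactly the capped greedy pass over the remaining seeds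
theorem pvAWhile_eq_bLoop (mx : Int) (seeds refs : List (List (String × String)))
    (hnd : ∀ s ∈ seeds, (s.map Prod.fst).Nodup)
    (h : (refs.length : Int) < mx) (fuel : Nat) (hf : 1 ≤ fuel) :
    pvAWhile mx seeds (fuel + 1) refs = pvBLoop mx refs seeds := by
  have hfst : (pvAFor mx refs false seeds).1 = pvBLoop mx refs seeds := pvAFor_fst mx seeds refs false h
  show (if ((refs.length : Int) < mx) then
          let r := pvAFor mx refs false seeds
          if r.2 then pvAWhile mx seeds fuel r.1 else r.1
        else refs) = pvBLoop mx refs seeds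
  rw [if_pos h]
  set r := pvAFor mx refs false seeds with hr
  cases hr2 : r.2
  · simpa [hr2] using hfst
  · simp only [hr2, if_true]
    obtain ⟨f, rfl⟩ : ∃ f, fuel = f + 1 := ⟨fuel - 1, by omega⟩
    have hstable : pvAWhile mx seeds (f + 1) r.1 = r.1 := by
      show (if ((r.1.length : Int) < mx) then
              let r2 := pvAFor mx r.1 false seeds
              if r2.2 then pvAWhile mx seeds f r2.1 else r2.1
            else r.1) = r.1
      by_cases hg : ((r.1.length : Int) < mx)
      · rcases pvAFor_complete mx seeds refs false hnd with hcap | hall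
        · rw [← hr] at hcap; omega
        · rw [← hr] at hall
          have := pvAFor_nochange mx seeds r.1 false hall
          rw [if_pos hg]
          simp [this]
      · rw [if_neg hg]
    rw [hstable, hfst]

-- core: for refs.length ≤ mx, A's loop followed by the slice equals the capped greedy pass
theorem pvCore (mx : Int) (seeds refs0 : List (List (String × String)))
    (hnd : ∀ s ∈ seeds, (s.map Prod.fst).Nodup) (h0 : (refs0.length : Int) ≤ mx) :
    PySem.List.slice (pvAWhile mx seeds (seeds.length + 2) refs0) none (some mx) = pvBLoop mx refs0 seeds := by
  have hmx0 : 0 ≤ mx := by omega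
  rcases eq_or_lt_of_le h0 with heq | hlt
  · have hng : ¬ ((refs0.length : Int) < mx) := by omega
    have hwh : pvAWhile mx seeds (seeds.length + 2) refs0 = refs0 := by
      cases seeds with
      | nil => simp [pvAWhile, hng]
      | cons a l => simp [pvAWhile, hng]
    rw [hwh, pvBLoop_stop mx refs0 seeds (by omega), pvSliceTo_nonneg _ _ hmx0]
    exact List.take_of_length_le (by omega)
  · have hble : ∀ (cand : List (List (String × String))) (refs : List (List (String × String))),
        (refs.length : Int) ≤ mx → ((pvBLoop mx refs cand).length : Int) ≤ mx := by
      intro cand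
      induction cand with
      | nil => intro refs h; simpa [pvBLoop] using h
      | cons s rest ih =>
        intro refs h
        by_cases hc : ((refs.length : Int) ≥ mx)
        · simpa [pvBLoop, hc] using h
        · by_cases hs : pySeedIn s refs = true
          · simpa [pvBLoop, hc, hs] using ih refs h
          · have : ((refs ++ [s]).length : Int) ≤ mx := by simp; omega
            simpa [pvBLoop, hc, hs] using ih (refs ++ [s]) this
    have : pvAWhile mx seeds (seeds.length + 1 + 1) refs0 = pvBLoop mx refs0 seeds :=
      pvAWhile_eq_bLoop mx seeds refs0 hnd hlt (seeds.length + 1) (by omega)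
    rw [show seeds.length + 2 = seeds.length + 1 + 1 from rfl, this, pvSliceTo_nonneg _ _ hmx0]
    exact List.take_of_length_le (by
      have := hble seeds refs0 (by omega)
      omega)

-- A's while loop does nothing when the guard already fails
theorem pvAWhile_stop (mx : Int) (seeds refs : List (List (String × String))) (fuel : Nat)
    (h : ¬ ((refs.length : Int) < mx)) : pvAWhile mx seeds fuel refs = refs := by
  cases fuel with
  | zero => rfl
  | succ f =>
    show (if ((refs.length : Int) < mx) then _ else refs) = refs
    rw [if_neg h]

-- a same-domain and an other-domain seed are never python-dict-equal
theorem pyDictEq_false_of_P (t : String) (a b : List (String × String))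
    (hpa : ((PySem.Dict.mk a).getD "domain" "" == t) = true)
    (hpb : ((PySem.Dict.mk b).getD "domain" "" == t) = false) : pyDictEq a b = false := by
  cases h : pyDictEq a b with
  | false => rfl
  | true =>
    exfalso
    rw [pyDictEq_getD a b h "domain" ""] at hpa
    rw [hpa] at hpb
    cases hpb

-- A reduced to the capped greedy pass over the canonical candidate sequence
theorem pvA_bridge (seeds : List (List (String × String))) (target_domain : String) (n : Int)
    (hPre : Pre_pick_reference_seeds seeds target_domain n)
    (hD : ¬ D_pick_reference_seeds seeds target_domain n) :
    pick_reference_seeds seeds target_domain n =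
      pvBLoop (min n (seeds.length : Int)) []
        ((seeds.filter (fun s => ((PySem.Dict.mk s).getD "domain" "" == target_domain))).take 1 ++
         (seeds.filter (fun s => !((PySem.Dict.mk s).getD "domain" "" == target_domain))).take 1 ++ seeds) := by
  have hnd : ∀ s ∈ seeds, (s.map Prod.fst).Nodup := fun s hs => (hPre s hs).1
  have hsl : ∀ xs : List (List (String × String)),
      PySem.List.slice xs none (some (1 : Int)) = xs.take 1 := by
    intro xs; simpa using PySem.List.slice_to_natCast xs 1
  have hsl0 : ∀ (b : Int), PySem.List.slice ([] : List (List (String × String))) none (some b) = [] := by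
    intro b
    by_cases h : 0 ≤ b
    · rw [pvSliceTo_nonneg _ _ h]; simp
    · rw [pvSliceTo_neg _ _ (by omega)]; simp
  have hsingle : ∀ (mx : Int) (x : List (String × String)),
      PySem.List.slice (pvAWhile mx seeds (seeds.length + 2) [x]) none (some mx) = pvBLoop mx [] (x :: seeds) := by
    intro mx x
    by_cases hpos : 1 ≤ mx
    · have hB : pvBLoop mx [] (x :: seeds) = pvBLoop mx [x] seeds := by
        simp [pvBLoop, pySeedIn]
        exact fun h => absurd h (by omega)
      rw [hB]
      exact pvCore mx seeds [x] hnd (by simp; omega)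
    · rw [pvAWhile_stop mx seeds [x] _ (by simp; omega)]
      have hB : pvBLoop mx [] (x :: seeds) = [] := by
        simp [pvBLoop]
        exact fun h => absurd h (by omega)
      rw [hB]
      rcases lt_or_ge mx 0 with hneg | hz
      · rw [pvSliceTo_neg _ _ hneg]
        simp
        omega
      · have hz0 : mx = 0 := by omega
        subst hz0
        rw [pvSliceTo_nonneg _ _ le_rfl]
        simp
  have htake : ∀ (a : List (String × String)) (l : List (List (String × String))),
      (a :: l).take 1 = [a] := fun a l => rfl
  simp only [pick_reference_seeds, hsl, PySem.List.len_eq]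
  rcases hS : seeds.filter (fun s => ((PySem.Dict.mk s).getD "domain" "" == target_domain)) with _ | ⟨s0, tl1⟩ <;>
    rcases hO : seeds.filter (fun s => !((PySem.Dict.mk s).getD "domain" "" == target_domain)) with _ | ⟨o0, tl2⟩
  · -- both filters empty: seeds is empty
    have hnil : seeds = [] := by
      cases hseeds : seeds with
      | nil => rfl
      | cons a l =>
        exfalso
        by_cases hpa : ((PySem.Dict.mk a).getD "domain" "" == target_domain) = true
        · have : a ∈ seeds.filter (fun s => ((PySem.Dict.mk s).getD "domain" "" == target_domain)) :=
            List.mem_filter.mpr ⟨by simp [hseeds], hpa⟩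
          rw [hS] at this; cases this
        · have : a ∈ seeds.filter (fun s => !((PySem.Dict.mk s).getD "domain" "" == target_domain)) :=
            List.mem_filter.mpr ⟨by simp [hseeds], by simp [hpa]⟩
          rw [hO] at this; cases this
    subst hnil
    simp only [List.take_nil, List.append_nil]
    rw [pvAWhile_stop _ _ _ _ (by
      have := min_le_right n ((List.length ([] : List (List (String × String))) : Int))
      simp at this ⊢
      try omega)]
    rw [hsl0]
    rfl
  · -- same empty, other nonempty
    simp only [htake, List.take_nil, List.nil_append, List.singleton_append]
    exact hsingle _ o0
  · -- same nonempty, other empty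
    simp only [htake, List.take_nil, List.append_nil, List.singleton_append]
    exact hsingle _ s0
  · -- both nonempty
    have hs0 : s0 ∈ seeds ∧ ((PySem.Dict.mk s0).getD "domain" "" == target_domain) = true := by
      have : s0 ∈ seeds.filter (fun s => ((PySem.Dict.mk s).getD "domain" "" == target_domain)) := by
        rw [hS]; simp
      exact ⟨(List.mem_filter.mp this).1, (List.mem_filter.mp this).2⟩
    have ho0 : o0 ∈ seeds ∧ ((PySem.Dict.mk o0).getD "domain" "" == target_domain) = false := by
      have : o0 ∈ seeds.filter (fun s => !((PySem.Dict.mk s).getD "domain" "" == target_domain)) := by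
        rw [hO]; simp
      refine ⟨(List.mem_filter.mp this).1, ?_⟩
      have := (List.mem_filter.mp this).2
      simpa using this
    have hE : pyDictEq s0 o0 = false := pyDictEq_false_of_P target_domain s0 o0 hs0.2 ho0.2
    have hn1 : n ≠ -1 := by
      intro hn
      exact hD ⟨hn, ⟨s0, hs0.1, by simpa using hs0.2⟩, ⟨o0, ho0.1, by
        intro hcontra
        rw [hcontra] at ho0
        simp at ho0⟩⟩
    have hlen1 : 1 ≤ (seeds.length : Int) := by
      have := hs0.1
      cases seeds with
      | nil => cases this
      | cons a l =>
        have hl : (a :: l).length = l.length + 1 := rfl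
        omega
    simp only [htake, List.cons_append, List.nil_append]
    set mx := min n (seeds.length : Int) with hmx
    have hmxle : mx ≤ n ∧ mx ≤ (seeds.length : Int) ∧ (mx = n ∨ mx = (seeds.length : Int)) :=
      ⟨min_le_left _ _, min_le_right _ _, min_choice _ _⟩
    rcases lt_or_ge mx 2 with hlt2 | hge2
    · -- cap already reached by the two seeding elements
      rw [pvAWhile_stop mx seeds [s0, o0] _ (by simp; omega)]
      rcases lt_or_ge mx 1 with hlt1 | hge1
      · -- mx ≤ 0: both sides empty
        have hB : pvBLoop mx [] (s0 :: o0 :: seeds) = [] := by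
          simp [pvBLoop]
          exact fun h => absurd h (by omega)
        rw [hB]
        rcases lt_or_ge mx 0 with hneg | hz
        · -- mx < 0 and n ≠ -1 force mx ≤ -2
          have hmn : mx = n := by rcases hmxle.2.2 with h | h <;> omega
          have hle2 : mx ≤ -2 := by omega
          rw [pvSliceTo_neg _ _ hneg]
          simp
          omega
        · have hz0 : mx = 0 := by omega
          rw [hz0, pvSliceTo_nonneg _ _ le_rfl]
          simp
      · -- mx = 1
        have h1 : mx = 1 := by omega
        rw [h1, pvSliceTo_nonneg _ _ (by omega)]
        have hB : pvBLoop 1 [] (s0 :: o0 :: seeds) = [s0] := by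
          simp [pvBLoop, pySeedIn]
        rw [hB]
        rfl
    · -- room for both seeding elements
      have hB : pvBLoop mx [] (s0 :: o0 :: seeds) = pvBLoop mx [s0, o0] seeds := by
        simp [pvBLoop, pySeedIn, hE]
        rw [if_neg (show ¬ mx ≤ 0 by omega), if_neg (show ¬ mx ≤ 1 by omega)]
      rw [hB]
      exact pvCore mx seeds [s0, o0] hnd (by simp; omega)

-- the freshly appended part of pvDedup
def pvNew (acc : List (List (String × String))) :
    List (List (String × String)) → List (List (String × String))
  | [] => []
  | s :: rest => if pySeedIn s acc then pvNew acc rest else s :: pvNew (acc ++ [s]) rest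

theorem pvDedup_eq : ∀ (cand acc : List (List (String × String))),
    pvDedup acc cand = acc ++ pvNew acc cand := by
  intro cand
  induction cand with
  | nil => intro acc; simp [pvDedup, pvNew]
  | cons s rest ih =>
    intro acc
    by_cases hs : pySeedIn s acc = true
    · simp [pvDedup, pvNew, hs, ih acc]
    · simp [pvDedup, pvNew, hs, ih (acc ++ [s])]

theorem pvNew_mem (x : List (String × String)) :
    ∀ (cand acc : List (List (String × String))), x ∈ pvNew acc cand → x ∈ cand := by
  intro cand
  induction cand with
  | nil => intro acc h; cases h
  | cons s rest ih =>
    intro acc h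
    by_cases hs : pySeedIn s acc = true
    · simp only [pvNew, hs, if_true] at h
      exact List.mem_cons_of_mem _ (ih acc h)
    · simp only [pvNew, hs, if_false, Bool.false_eq_true, List.mem_cons] at h
      rcases h with rfl | h
      · exact List.mem_cons_self
      · exact List.mem_cons_of_mem _ (ih (acc ++ [s]) h)

-- the appended part only depends on the membership test of the accumulator
theorem pvNew_congr : ∀ (r A₁ A₂ : List (List (String × String))),
    (∀ x ∈ r, pySeedIn x A₁ = pySeedIn x A₂) → pvNew A₁ r = pvNew A₂ r := by
  intro r
  induction r with
  | nil => intro A₁ A₂ _; rfl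
  | cons y rest ih =>
    intro A₁ A₂ h
    have hy := h y (by simp)
    by_cases h1 : pySeedIn y A₁ = true
    · have h2 : pySeedIn y A₂ = true := by rw [← hy]; exact h1
      simp only [pvNew, h1, h2, if_true]
      exact ih A₁ A₂ (fun x hx => h x (by simp [hx]))
    · have h1' : pySeedIn y A₁ = false := by
        cases hq : pySeedIn y A₁
        · rfl
        · exact absurd hq h1
      have h2 : pySeedIn y A₂ = false := by rw [← hy]; exact h1'
      simp only [pvNew, h1', h2, Bool.false_eq_true, if_false]
      rw [ih (A₁ ++ [y]) (A₂ ++ [y]) (fun x hx => by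
        rw [pySeedIn_append, pySeedIn_append, h x (by simp [hx])])]

-- prepending an accumulator b filters the appended part by non-membership in b
theorem pvNew_filter : ∀ (cand b acc : List (List (String × String))),
    (∀ s ∈ cand, (s.map Prod.fst).Nodup) →
    (∀ r ∈ b, (r.map Prod.fst).Nodup) →
    (∀ r ∈ acc, (r.map Prod.fst).Nodup) →
    pvNew (b ++ acc) cand = (pvNew acc cand).filter (fun s => !pySeedIn s b) := by
  intro cand
  induction cand with
  | nil => intro b acc _ _ _; rfl
  | cons s rest ih =>
    intro b acc hc hb hacc
    have hcs : (s.map Prod.fst).Nodup := hc s (by simp)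
    have hcr : ∀ t ∈ rest, (t.map Prod.fst).Nodup := fun t ht => hc t (by simp [ht])
    have hba : ∀ r ∈ b ++ acc, (r.map Prod.fst).Nodup := by
      intro r hr
      rcases List.mem_append.mp hr with h | h
      · exact hb r h
      · exact hacc r h
    by_cases hsa : pySeedIn s acc = true
    · have h1 : pySeedIn s (b ++ acc) = true := by
        rw [pySeedIn_concat, hsa]; simp
      simp only [pvNew, h1, hsa, if_true]
      exact ih b acc hcr hb hacc
    · by_cases hsb : pySeedIn s b = true
      · have h1 : pySeedIn s (b ++ acc) = true := by
          rw [pySeedIn_concat, hsb]; simp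
        simp only [pvNew, h1, hsa, if_true, if_neg, Bool.false_eq_true, if_false,
          List.filter_cons, hsb, Bool.not_true]
        have hstep : pvNew (b ++ acc) rest = pvNew ((b ++ acc) ++ [s]) rest := by
          refine (pvNew_congr rest ((b ++ acc) ++ [s]) (b ++ acc) ?_).symm
          intro x hx
          exact pySeedIn_redundant (b ++ acc) s x hba (hcr x hx) h1
        rw [hstep, List.append_assoc]
        exact ih b (acc ++ [s]) hcr hb (by
          intro r hr
          rcases List.mem_append.mp hr with h | h
          · exact hacc r h
          · simp at h; subst h; exact hcs)
      · have h1 : pySeedIn s (b ++ acc) ≠ true := by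
          rw [pySeedIn_concat]
          simp [hsa, hsb]
        have h1' : pySeedIn s (b ++ acc) = false := by
          cases hq : pySeedIn s (b ++ acc)
          · rfl
          · exact absurd hq h1
        have hsa' : pySeedIn s acc = false := by
          cases hq : pySeedIn s acc
          · rfl
          · exact absurd hq hsa
        simp only [pvNew, h1', hsa', Bool.false_eq_true, if_false,
          List.filter_cons, hsb, Bool.not_false, if_true]
        rw [List.append_assoc]
        congr 1
        rw [ih b (acc ++ [s]) hcr hb (by
          intro r hr
          rcases List.mem_append.mp hr with h | h
          · exact hacc r h
          · simp at h; subst h; exact hcs)]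

-- first match in the dedup'd list = first match in the original list, for pyDictEq-invariant predicates
theorem pvNew_find? (P : List (String × String) → Bool)
    (hP : ∀ a b, pyDictEq a b = true → P a = P b) :
    ∀ (cand acc : List (List (String × String))), (∀ r ∈ acc, P r = false) →
      List.find? P (pvNew acc cand) = List.find? P cand := by
  intro cand
  induction cand with
  | nil => intro acc _; rfl
  | cons s rest ih =>
    intro acc hacc
    by_cases hsa : pySeedIn s acc = true
    · obtain ⟨r, hr, hrs⟩ : ∃ r ∈ acc, pyDictEq r s = true := by
        simpa [pySeedIn] using hsa
      have hPs : P s = false := by rw [← hP r s hrs]; exact hacc r hr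
      simp only [pvNew, hsa, if_true]
      rw [ih acc hacc, List.find?_cons_of_neg (by simp [hPs])]
    · simp only [pvNew, hsa, if_neg, Bool.false_eq_true, if_false]
      by_cases hPs : P s = true
      · rw [List.find?_cons_of_pos hPs, List.find?_cons_of_pos hPs]
      · rw [List.find?_cons_of_neg hPs, List.find?_cons_of_neg hPs]
        exact ih (acc ++ [s]) (by
          intro r hr
          rcases List.mem_append.mp hr with h | h
          · exact hacc r h
          · simp at h; subst h; simpa using hPs)

theorem take1_filter (P : List (String × String) → Bool) :
    ∀ (l : List (List (String × String))), (l.filter P).take 1 = (List.find? P l).toList := by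
  intro l
  induction l with
  | nil => rfl
  | cons a l ih =>
    by_cases h : P a = true
    · simp [List.filter_cons, h, List.find?_cons_of_pos h]
    · simp only [List.filter_cons, h, Bool.false_eq_true, if_false,
        List.find?_cons_of_neg h]
      exact ih

-- the getD-based predicates are pyDictEq-invariant
theorem pvPcong (t : String) (a b : List (String × String)) (h : pyDictEq a b = true) :
    ((PySem.Dict.mk a).getD "domain" "" == t) = ((PySem.Dict.mk b).getD "domain" "" == t) := by
  rw [pyDictEq_getD a b h "domain" ""]

-- the candidate sequence A greedily fills from, deduplicated, is exactly B's canonical ordering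
theorem pv_canonical (seeds : List (List (String × String))) (t : String)
    (hnd : ∀ s ∈ seeds, (s.map Prod.fst).Nodup) :
    pvDedup [] ((seeds.filter (fun s => ((PySem.Dict.mk s).getD "domain" "" == t))).take 1 ++
                (seeds.filter (fun s => !((PySem.Dict.mk s).getD "domain" "" == t))).take 1 ++ seeds) =
      (((pvDedup [] seeds).find? (fun s => ((PySem.Dict.mk s).getD "domain" "" == t))).toList ++
       ((pvDedup [] seeds).find? (fun s => !((PySem.Dict.mk s).getD "domain" "" == t))).toList) ++
      (pvDedup [] seeds).filter (fun s => !pySeedIn s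
        (((pvDedup [] seeds).find? (fun s => ((PySem.Dict.mk s).getD "domain" "" == t))).toList ++
         ((pvDedup [] seeds).find? (fun s => !((PySem.Dict.mk s).getD "domain" "" == t))).toList)) := by
  have hu : pvDedup [] seeds = pvNew [] seeds := by simpa using pvDedup_eq seeds []
  have hPc : ∀ a b, pyDictEq a b = true →
      ((PySem.Dict.mk a).getD "domain" "" == t) = ((PySem.Dict.mk b).getD "domain" "" == t) :=
    pvPcong t
  have hPc' : ∀ a b, pyDictEq a b = true →
      (!((PySem.Dict.mk a).getD "domain" "" == t)) = (!((PySem.Dict.mk b).getD "domain" "" == t)) := by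
    intro a b h; rw [pvPcong t a b h]
  have hfs : (pvDedup [] seeds).find? (fun s => ((PySem.Dict.mk s).getD "domain" "" == t)) =
      seeds.find? (fun s => ((PySem.Dict.mk s).getD "domain" "" == t)) := by
    rw [hu]; exact pvNew_find? _ hPc seeds [] (by intro r hr; cases hr)
  have hfo : (pvDedup [] seeds).find? (fun s => !((PySem.Dict.mk s).getD "domain" "" == t)) =
      seeds.find? (fun s => !((PySem.Dict.mk s).getD "domain" "" == t)) := by
    rw [hu]; exact pvNew_find? _ hPc' seeds [] (by intro r hr; cases hr)
  have hf1 : (seeds.filter (fun s => ((PySem.Dict.mk s).getD "domain" "" == t))).take 1 =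
      ((pvDedup [] seeds).find? (fun s => ((PySem.Dict.mk s).getD "domain" "" == t))).toList := by
    rw [hfs]; exact take1_filter _ seeds
  have hf2 : (seeds.filter (fun s => !((PySem.Dict.mk s).getD "domain" "" == t))).take 1 =
      ((pvDedup [] seeds).find? (fun s => !((PySem.Dict.mk s).getD "domain" "" == t))).toList := by
    rw [hfo]; exact take1_filter _ seeds
  rw [hf1, hf2]
  set fs := (pvDedup [] seeds).find? (fun s => ((PySem.Dict.mk s).getD "domain" "" == t)) with hfs'
  set fo := (pvDedup [] seeds).find? (fun s => !((PySem.Dict.mk s).getD "domain" "" == t)) with hfo'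
  have hmemu : ∀ x ∈ pvDedup [] seeds, x ∈ seeds := by
    intro x hx; rw [hu] at hx; exact pvNew_mem x seeds [] hx
  have hndfront : ∀ r ∈ fs.toList ++ fo.toList, (r.map Prod.fst).Nodup := by
    intro r hr
    rcases List.mem_append.mp hr with h | h
    · cases hcase : fs with
      | none => rw [hcase] at h; cases h
      | some v =>
        rw [hcase] at h; simp at h; subst h
        exact hnd r (hmemu r (List.mem_of_find?_eq_some (hfs'.symm.trans hcase)))
    · cases hcase : fo with
      | none => rw [hcase] at h; cases h
      | some v =>
        rw [hcase] at h; simp at h; subst h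
        exact hnd r (hmemu r (List.mem_of_find?_eq_some (hfo'.symm.trans hcase)))
  have hmain : ∀ (front : List (List (String × String))),
      (∀ r ∈ front, (r.map Prod.fst).Nodup) →
      pvDedup front seeds =
        front ++ (pvDedup [] seeds).filter (fun s => !pySeedIn s front) := by
    intro front hfr
    rw [pvDedup_eq seeds front, hu]
    congr 1
    have := pvNew_filter seeds front [] (fun s hs => hnd s hs) hfr (by intro r hr; cases hr)
    simpa using this
  -- peel the (at most two, mutually non-equal) front elements off the dedup run
  cases hcs : fs with
  | none =>
    cases hco : fo with
    | none => simpa using hmain [] (by intro r hr; cases hr)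
    | some o0 =>
      have : pvDedup [] (o0 :: seeds) = pvDedup [o0] seeds := by
        simp [pvDedup, pySeedIn]
      simpa [this] using hmain [o0] (by
        intro r hr; simp at hr; rw [hr]
        exact hndfront o0 (by simp [hcs, hco]))
  | some s0 =>
    have hnds0 : (s0.map Prod.fst).Nodup := hndfront s0 (by simp [hcs])
    cases hco : fo with
    | none =>
      have : pvDedup [] (s0 :: seeds) = pvDedup [s0] seeds := by
        simp [pvDedup, pySeedIn]
      simpa [this] using hmain [s0] (by intro r hr; simp at hr; subst hr; exact hnds0)
    | some o0 =>
      have hndo0 : (o0.map Prod.fst).Nodup := hndfront o0 (by simp [hcs, hco])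
      have hPs0 : ((PySem.Dict.mk s0).getD "domain" "" == t) = true := by
        have h := hfs'.symm.trans hcs
        simpa using List.find?_some h
      have hPo0 : ((PySem.Dict.mk o0).getD "domain" "" == t) = false := by
        have h := hfo'.symm.trans hco
        have := List.find?_some h
        simpa using this
      have hE : pyDictEq s0 o0 = false := pyDictEq_false_of_P t s0 o0 hPs0 hPo0
      have hstep : pvDedup [] (s0 :: o0 :: seeds) = pvDedup [s0, o0] seeds := by
        simp [pvDedup, pySeedIn, hE]
      simpa [hstep] using hmain [s0, o0] (by
        intro r hr; simp at hr
        rcases hr with h | h <;> rw [h]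
        · exact hnds0
        · exact hndo0)

-- the capped greedy pass is a truncation of the full dedup run
theorem pvBLoop_eq_take (mx : Int) (h0 : 0 ≤ mx) :
    ∀ (cand acc : List (List (String × String))), (acc.length : Int) ≤ mx →
      pvBLoop mx acc cand = (pvDedup acc cand).take mx.toNat := by
  intro cand
  induction cand with
  | nil =>
    intro acc h
    simp only [pvBLoop, pvDedup]
    exact (List.take_of_length_le (by omega)).symm
  | cons s rest ih =>
    intro acc h
    by_cases hc : ((acc.length : Int) ≥ mx)
    · have hlen : acc.length = mx.toNat := by omega
      simp only [pvBLoop, hc, if_true]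
      rw [pvDedup_eq, ← hlen, List.take_left]
    · by_cases hs : pySeedIn s acc = true
      · simp only [pvBLoop, pvDedup, hc, if_false, hs, if_true]
        exact ih acc h
      · simp only [pvBLoop, pvDedup, hc, if_false, hs, Bool.false_eq_true]
        exact ih (acc ++ [s]) (by simp; omega)

theorem pvBLoop_nilzero (mx : Int) (cand : List (List (String × String))) (h : mx ≤ 0) :
    pvBLoop mx [] cand = [] := by
  cases cand with
  | nil => rfl
  | cons s rest => simp [pvBLoop]; omega

-- main equivalence outside D_
theorem pv_main (seeds : List (List (String × String))) (target_domain : String) (n : Int)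
    (hPre : Pre_pick_reference_seeds seeds target_domain n)
    (hD : ¬ D_pick_reference_seeds seeds target_domain n) :
    pick_reference_seeds seeds target_domain n = pick_reference_seeds_alt seeds target_domain n := by
  have hnd : ∀ s ∈ seeds, (s.map Prod.fst).Nodup := fun s hs => (hPre s hs).1
  rw [pvA_bridge seeds target_domain n hPre hD]
  simp only [pick_reference_seeds_alt, PySem.List.len_eq]
  set mx := min n (seeds.length : Int) with hmx
  by_cases hpos : 0 < mx
  · rw [if_pos hpos, pvSliceTo_nonneg _ _ (by omega)]
    rw [pvBLoop_eq_take mx (by omega) _ [] (by simp; omega)]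
    congr 1
    exact pv_canonical seeds target_domain hnd
  · rw [if_neg hpos]
    exact pvBLoop_nilzero mx _ (by omega)

-- ===== VERDICT (by name: the statement is the Claim_ definition above) =====
theorem pick_reference_seeds_spec : Claim_unchanged_pick_reference_seeds := by
  intro seeds target_domain n _ hPre
  unfold Spec_pick_reference_seeds
  intro hD
  exact pv_main seeds target_domain n hPre hD

theorem pick_reference_seeds_changed : Claim_changed_pick_reference_seeds := by
  unfold Claim_changed_pick_reference_seeds; decide

theorem pick_reference_seeds_tight : Claim_exact_pick_reference_seeds := by
  intro seeds target_domain n _ hPre hD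
  obtain ⟨hn, ⟨sw, hsw, hswd⟩, ⟨ow, how, howd⟩⟩ := hD
  subst hn
  have hsl : ∀ xs : List (List (String × String)),
      PySem.List.slice xs none (some (1 : Int)) = xs.take 1 := by
    intro xs; simpa using PySem.List.slice_to_natCast xs 1
  have htake : ∀ (a : List (String × String)) (l : List (List (String × String))),
      (a :: l).take 1 = [a] := fun a l => rfl
  simp only [pick_reference_seeds, pick_reference_seeds_alt, hsl, PySem.List.len_eq]
  rcases hS : seeds.filter (fun s => ((PySem.Dict.mk s).getD "domain" "" == target_domain)) with _ | ⟨s0, tl1⟩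
  · exfalso
    have : sw ∈ seeds.filter (fun s => ((PySem.Dict.mk s).getD "domain" "" == target_domain)) :=
      List.mem_filter.mpr ⟨hsw, by simp [hswd]⟩
    rw [hS] at this; cases this
  rcases hO : seeds.filter (fun s => !((PySem.Dict.mk s).getD "domain" "" == target_domain)) with _ | ⟨o0, tl2⟩
  · exfalso
    have : ow ∈ seeds.filter (fun s => !((PySem.Dict.mk s).getD "domain" "" == target_domain)) :=
      List.mem_filter.mpr ⟨how, by simp [howd]⟩
    rw [hO] at this; cases this
  have hlen1 : 1 ≤ (seeds.length : Int) := by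
    cases seeds with
    | nil => cases hsw
    | cons a l =>
      have hl : (a :: l).length = l.length + 1 := rfl
      omega
  have hmx : min (-1 : Int) ((seeds.length : Nat) : Int) = -1 := by
    apply min_eq_left; omega
  simp only [htake, List.cons_append, List.nil_append, hmx]
  rw [pvAWhile_stop (-1) seeds [s0, o0] _ (by simp)]
  have hAv : PySem.List.slice [s0, o0] none (some (-1)) = [s0] := by
    rw [pvSliceTo_neg _ _ (by omega)]
    simp
  rw [hAv, if_neg (by omega)]
  simp
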